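-- pv_equiv track=rewrite | github.com/wywlds/leetcode | page12/leet581_find_unsorted_subarray.py | find_sorted_index
-- ===== SOURCE A (Python) =====
-- def find_sorted_index(nums):
--     N = len(nums)
--     first_i = N - 1
--     for i in range(N - 1):
--         num1 = nums[i]
--         num2 = nums[i + 1]
--         if num1 > num2:
--             first_i = i
--             break
--     if first_i == 0:
--         return -1
--     index = first_i - 1
--     for i in range(first_i + 1, N):
--         while index >= 0 and nums[index] > nums[i]:
--             index -= 1
--     return index
-- ===== SOURCE B (Python) =====
-- def find_sorted_index(nums):
--     first_i = len(nums) - 1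
--     for i, (a, b) in enumerate(zip(nums, nums[1:])):
--         if a > b:
--             first_i = i
--             break
--     if first_i == 0:
--         return -1
--     tail = nums[first_i + 1:]
--     if not tail:
--         return first_i - 1
--     m = min(tail)
--     index = -1
--     for j in range(first_i):
--         if nums[j] <= m:
--             index = j
--     return index
-- ===== Notes on version B (the rewrite author's own statement) =====
-- stated objective: alternative
-- what changed: A's nested for/while second phase is replaced by a single suffix minimum plus one left-to-right pass keeping the last index whose value is <= that minimum (instead of A's decrementing right-to-left while loop), and the first descent is found by enumerating adjacent pairs from zip.
import Mathlib
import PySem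

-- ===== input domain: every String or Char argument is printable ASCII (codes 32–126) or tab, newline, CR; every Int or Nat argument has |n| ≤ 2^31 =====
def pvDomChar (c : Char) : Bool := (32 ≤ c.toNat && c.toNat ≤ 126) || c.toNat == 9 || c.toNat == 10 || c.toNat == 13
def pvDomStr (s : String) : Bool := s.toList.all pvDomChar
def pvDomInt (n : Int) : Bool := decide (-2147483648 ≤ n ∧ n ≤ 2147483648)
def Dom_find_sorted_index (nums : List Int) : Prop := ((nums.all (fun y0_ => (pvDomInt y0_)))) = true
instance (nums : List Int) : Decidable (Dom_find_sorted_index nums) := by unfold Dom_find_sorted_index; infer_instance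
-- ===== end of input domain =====

-- B replaces A's nested for/while second phase by one suffix minimum and a single
-- left-to-right pass keeping the last index with value ≤ that minimum (alternative decomposition).

-- ===== PORT A =====
-- first loop of A: first i with nums[i] > nums[i+1], else N-1 (break ported as recursion;
-- the fuel argument only makes the recursion structural, it never runs out when started at nums.length)
def pvA_first (nums : List Int) (fuel i : Nat) : Int :=
  match fuel with
  | 0 => (nums.length : Int) - 1
  | fuel + 1 =>
    if h : i + 1 < nums.length then
      if nums[i] > nums[i + 1] then (i : Int) else pvA_first nums fuel (i + 1)
    else (nums.length : Int) - 1

-- A's inner while loop: 'while index >= 0 and nums[index] > nums[i]: index -= 1'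
-- (fuel (index+1).toNat is exactly enough to reach -1; it only makes the recursion structural)
def pvA_inner (nums : List Int) (v : Int) (fuel : Nat) (index : Int) : Int :=
  match fuel with
  | 0 => index
  | fuel + 1 =>
    if 0 ≤ index ∧ PySem.List.pyGetD nums index 0 > v then
      pvA_inner nums v fuel (index - 1)
    else index

def find_sorted_index (nums : List Int) : Int :=
  let N : Int := nums.length
  let first_i := pvA_first nums nums.length 0
  if first_i = 0 then -1
  else
    (PySem.List.pyRange (first_i + 1) N 1).foldl
      (fun index i => pvA_inner nums (PySem.List.pyGetD nums i 0) (index + 1).toNat index) (first_i - 1)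

-- ===== PORT B =====
-- B's search for the first descent: enumerate(zip(nums, nums[1:])) with break,
-- ported as structural recursion over the pair list returning the found position
def pvB_find : List (Int × Int) → Option Nat
  | [] => none
  | (a, b) :: t => if a > b then some 0 else (pvB_find t).map (· + 1)

def find_sorted_index_alt (nums : List Int) : Int :=
  let first_i : Int :=
    match pvB_find (nums.zip (nums.drop 1)) with
    | some i => (i : Int)
    | none => (nums.length : Int) - 1
  if first_i = 0 then -1
  else
    -- tail = nums[first_i+1:]; 'if not tail: return first_i - 1' and 'm = min(tail)' as one match
    match PySem.List.min? (PySem.List.slice nums (some (first_i + 1)) none) (fun x => x) with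
    | none => first_i - 1
    | some m =>
      -- forward pass: index = -1; for j in range(first_i): if nums[j] <= m: index = j
      (PySem.List.pyRange 0 first_i 1).foldl
        (fun index j => if PySem.List.pyGetD nums j 0 ≤ m then j else index) (-1)

-- ===== PRECONDITION & SPEC =====
def Spec_find_sorted_index (nums : List Int) (out : Int) : Prop := out = find_sorted_index_alt nums
instance (nums : List Int) (out : Int) : Decidable (Spec_find_sorted_index nums out) := by unfold Spec_find_sorted_index; infer_instance

-- ===== CLAIM =====
def Claim_equal_find_sorted_index : Prop := ∀ (nums : List Int), Dom_find_sorted_index nums → Spec_find_sorted_index nums (find_sorted_index nums)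

-- ===== LEMMAS AND PROOFS =====

-- fuel-free (well-founded) version of A's inner while loop, for clean reasoning
def pvW_inner (nums : List Int) (v : Int) (index : Int) : Int :=
  if h : 0 ≤ index ∧ PySem.List.pyGetD nums index 0 > v then
    pvW_inner nums v (index - 1)
  else index
termination_by (index + 1).toNat
decreasing_by omega

lemma pvW_inner_step (nums : List Int) (v index : Int) :
    pvW_inner nums v index =
      if 0 ≤ index ∧ PySem.List.pyGetD nums index 0 > v then pvW_inner nums v (index - 1)
      else index := by
  rw [pvW_inner]; simp

lemma pvA_inner_bridge (nums : List Int) (v : Int) (fuel : Nat) (index : Int)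
    (hf : (index + 1).toNat ≤ fuel) :
    pvA_inner nums v fuel index = pvW_inner nums v index := by
  induction fuel generalizing index with
  | zero =>
    rw [pvA_inner, pvW_inner_step, if_neg (by omega)]
  | succ fuel ih =>
    rw [pvA_inner, pvW_inner_step]
    by_cases h : 0 ≤ index ∧ PySem.List.pyGetD nums index 0 > v
    · rw [if_pos h, if_pos h]; exact ih (index - 1) (by omega)
    · rw [if_neg h, if_neg h]

lemma pvA_first_ge (nums : List Int) (fuel i : Nat) : -1 ≤ pvA_first nums fuel i := by
  induction fuel generalizing i with
  | zero => rw [pvA_first]; omega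
  | succ fuel ih => rw [pvA_first]; split_ifs <;> first | omega | exact ih (i + 1)

lemma pvA_first_nonneg (nums : List Int) (fuel i : Nat) (h : 1 ≤ nums.length) :
    0 ≤ pvA_first nums fuel i := by
  induction fuel generalizing i with
  | zero => rw [pvA_first]; omega
  | succ fuel ih => rw [pvA_first]; split_ifs <;> first | omega | exact ih (i + 1)

-- B's pair recursion computes A's first loop
lemma pvB_find_eq_aux (nums : List Int) (fuel i : Nat) (hf : nums.length ≤ fuel + i + 1) :
    (match pvB_find ((nums.drop i).zip (nums.drop (i + 1))) with
      | some k => ((i + k : Nat) : Int)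
      | none => (nums.length : Int) - 1) = pvA_first nums fuel i := by
  induction fuel generalizing i with
  | zero =>
    have hnil : nums.drop (i + 1) = [] := List.drop_eq_nil_of_le (by omega)
    rw [pvA_first, hnil, List.zip_nil_right, pvB_find]
  | succ fuel ih =>
    rw [pvA_first]
    by_cases h : i + 1 < nums.length
    · have h1 : nums.drop i = nums[i] :: nums.drop (i + 1) :=
        List.drop_eq_getElem_cons (by omega)
      have h2 : nums.drop (i + 1) = nums[i + 1] :: nums.drop (i + 2) :=
        List.drop_eq_getElem_cons h
      have hz : (nums.drop i).zip (nums.drop (i + 1)) =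
          (nums[i], nums[i + 1]) :: (nums.drop (i + 1)).zip (nums.drop (i + 2)) := by
        rw [h1]; nth_rewrite 2 [h2]; rw [List.zip_cons_cons]
      rw [dif_pos h, hz, pvB_find]
      by_cases hd : nums[i] > nums[i + 1]
      · simp [hd]
      · rw [if_neg hd, if_neg hd]
        rw [← ih (i + 1) (by omega)]
        rw [show i + 1 + 1 = i + 2 from rfl]
        cases pvB_find ((nums.drop (i + 1)).zip (nums.drop (i + 2))) with
        | none => simp
        | some k => simp; ring
    · have hnil : nums.drop (i + 1) = [] := List.drop_eq_nil_of_le (by omega)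
      rw [dif_neg h, hnil, List.zip_nil_right, pvB_find]

lemma pvB_find_eq (nums : List Int) :
    (match pvB_find (nums.zip (nums.drop 1)) with
      | some k => (k : Int)
      | none => (nums.length : Int) - 1) = pvA_first nums nums.length 0 := by
  have := pvB_find_eq_aux nums nums.length 0 (by omega)
  simpa using this

-- two successive while-scans collapse into one scan for the smaller bound
lemma pvW_inner_comp (nums : List Int) (a b index : Int) :
    pvW_inner nums b (pvW_inner nums a index) = pvW_inner nums (min a b) index := by
  fun_induction pvW_inner nums (min a b) index with
  | case1 index h ih =>
    by_cases hga : PySem.List.pyGetD nums index 0 > a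
    · rw [pvW_inner_step nums a index, if_pos ⟨h.1, hga⟩]
      exact ih
    · have hb : PySem.List.pyGetD nums index 0 > b := by
        rcases min_lt_iff.mp h.2 with h' | h' <;> omega
      have hab : min a b = b := by omega
      rw [pvW_inner_step nums a index, if_neg (by tauto)]
      rw [pvW_inner_step nums b index, if_pos ⟨h.1, hb⟩]
      rw [hab]
  | case2 index h =>
    by_cases h0 : 0 ≤ index
    · have hle : ¬ PySem.List.pyGetD nums index 0 > min a b := by tauto
      have hga : ¬ PySem.List.pyGetD nums index 0 > a := by omega
      have hgb : ¬ PySem.List.pyGetD nums index 0 > b := by omega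
      rw [pvW_inner_step nums a index, if_neg (by tauto)]
      rw [pvW_inner_step nums b index, if_neg (by tauto)]
    · rw [pvW_inner_step nums a index, if_neg (by tauto)]
      rw [pvW_inner_step nums b index, if_neg (by tauto)]

lemma foldl_min_comm (t : List Int) (x y : Int) :
    t.foldl min (min x y) = min x (t.foldl min y) := by
  induction t generalizing y with
  | nil => simp
  | cons z t ih => simp only [List.foldl_cons, min_assoc, ih]

-- running-min characterisation of min? via foldl
lemma foldl_min_eq (t : List Int) (x : Int) :
    t.foldl min x =
      match PySem.List.min? t (fun y => y) with
      | none => x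
      | some m => min x m := by
  cases t with
  | nil => simp [PySem.List.min?]
  | cons y t =>
    rw [PySem.List.min?_id_cons]
    simpa using foldl_min_comm t x y

-- A's whole second phase over range(s, N) equals one scan with the suffix minimum
lemma phase2_eq (nums : List Int) (s : Nat) (index : Int) :
    (PySem.List.pyRange (s : Int) (nums.length : Int) 1).foldl
        (fun idx i => pvW_inner nums (PySem.List.pyGetD nums i 0) idx) index
      = match PySem.List.min? (nums.drop s) (fun y => y) with
        | none => index
        | some m => pvW_inner nums m index := by
  by_cases hs : s < nums.length
  · rw [PySem.List.pyRange_one_cons (by exact_mod_cast hs)]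
    have hdrop : nums.drop s = nums[s] :: nums.drop (s + 1) :=
      List.drop_eq_getElem_cons hs
    rw [hdrop, List.foldl_cons]
    have hget : PySem.List.pyGetD nums (s : Int) 0 = nums[s] := by
      rw [PySem.List.pyGetD_natCast, List.getD_eq_getElem _ _ hs]
    have hrec := phase2_eq nums (s + 1) (pvW_inner nums nums[s] index)
    push_cast at hrec ⊢
    rw [hget, hrec]
    rw [PySem.List.min?_id_cons]
    rw [foldl_min_eq]
    cases hmin : PySem.List.min? (nums.drop (s + 1)) (fun y => y) with
    | none => simp
    | some m => simp [pvW_inner_comp]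
  · rw [PySem.List.pyRange_one_eq_nil (by exact_mod_cast Nat.le_of_not_lt hs)]
    rw [List.drop_eq_nil_of_le (Nat.le_of_not_lt hs)]
    simp only [List.foldl_nil]
    rw [(PySem.List.min?_eq_none_iff ([] : List Int) (fun y => y)).mpr rfl]
termination_by nums.length - s

-- B's forward pass over range(0, f) equals the downward while scan started at f-1
lemma forward_eq_inner (nums : List Int) (m : Int) (f : Nat) :
    (PySem.List.pyRange 0 (f : Int) 1).foldl
        (fun index j => if PySem.List.pyGetD nums j 0 ≤ m then j else index) (-1)
      = pvW_inner nums m ((f : Int) - 1) := by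
  induction f with
  | zero =>
    rw [show ((0 : Nat) : Int) = 0 from rfl, PySem.List.pyRange_one_eq_nil le_rfl]
    rw [List.foldl_nil, pvW_inner_step, if_neg (by omega)]
    norm_num
  | succ f ih =>
    have hcast : ((f + 1 : Nat) : Int) = (f : Int) + 1 := by push_cast; ring
    rw [hcast, PySem.List.pyRange_one_succ_right (by positivity), List.foldl_append]
    simp only [List.foldl_cons, List.foldl_nil]
    rw [ih, show (f : Int) + 1 - 1 = (f : Int) from by ring, pvW_inner_step nums m (f : Int)]
    by_cases h : PySem.List.pyGetD nums (f : Int) 0 ≤ m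
    · rw [if_pos h, if_neg (by omega)]
    · rw [if_neg h, if_pos ⟨by positivity, by omega⟩]

-- ===== VERDICT =====
theorem find_sorted_index_spec : Claim_equal_find_sorted_index := by
  intro nums _
  unfold Spec_find_sorted_index find_sorted_index find_sorted_index_alt
  rw [pvB_find_eq]
  set f := pvA_first nums nums.length 0 with hf
  by_cases h0 : f = 0
  · simp [h0]
  · simp only [h0, ite_false]
    have hge : -1 ≤ f := pvA_first_ge nums nums.length 0
    have hnn : 0 ≤ f + 1 := by omega
    have hfun : (fun (index : Int) (i : Int) =>
        pvA_inner nums (PySem.List.pyGetD nums i 0) (index + 1).toNat index)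
        = fun (index : Int) (i : Int) => pvW_inner nums (PySem.List.pyGetD nums i 0) index := by
      funext index i
      exact pvA_inner_bridge nums _ _ index le_rfl
    rw [hfun, PySem.List.slice_from nums hnn]
    have hcast : f + 1 = ((f + 1).toNat : Int) := by omega
    have hp := phase2_eq nums (f + 1).toNat (f - 1)
    rw [← hcast] at hp
    rw [hp]
    cases hm : PySem.List.min? (List.drop (f + 1).toNat nums) (fun y => y) with
    | none => rfl
    | some m =>
      dsimp only
      have hne : nums ≠ [] := by
        intro h; subst h
        simp [PySem.List.min?] at hm
      have hlen : 1 ≤ nums.length := by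
        cases nums with | nil => exact absurd rfl hne | cons a t => simp
      have h0f : 0 ≤ f := pvA_first_nonneg nums nums.length 0 hlen
      have h1f : 1 ≤ f := by omega
      have hfnat : f = ((f.toNat : Nat) : Int) := by omega
      rw [hfnat, ← forward_eq_inner nums m f.toNat]
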